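-- pv_equiv track=rewrite | github.com/damianPolchlopek/Aplikacje-Python | lab5_moduly/polys.py | cmp_poly
-- ===== SOURCE A (Python) =====
-- def cmp_poly(poly1, poly2):             # bool, porownywanie
--     tmp = 0
--     min_value = min(len(poly1), len(poly2))
--
--     while tmp < min_value:
--         if poly1[tmp] != poly2[tmp]:
--             return False
--         tmp = tmp + 1
--
--     while tmp < len(poly1):
--         if poly1[tmp] != 0:
--             return False
--         tmp = tmp + 1
--
--     while tmp < len(poly2):
--         if poly2[tmp] != 0:
--             return False
--         tmp = tmp + 1
--
--     return True
-- ===== SOURCE B (Python) =====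
-- def cmp_poly(poly1, poly2):
--     def trim(p):
--         r = list(p)
--         while r and r[-1] == 0:
--             r.pop()
--         return r
--     return trim(poly1) == trim(poly2)
-- ===== Notes on version B (the rewrite author's own statement) =====
-- stated objective: simpler
-- what changed: B normalizes each polynomial by stripping trailing zeros and compares the two trimmed lists with ==, replacing A's three index-driven while loops over a shared counter.
import Mathlib
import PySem

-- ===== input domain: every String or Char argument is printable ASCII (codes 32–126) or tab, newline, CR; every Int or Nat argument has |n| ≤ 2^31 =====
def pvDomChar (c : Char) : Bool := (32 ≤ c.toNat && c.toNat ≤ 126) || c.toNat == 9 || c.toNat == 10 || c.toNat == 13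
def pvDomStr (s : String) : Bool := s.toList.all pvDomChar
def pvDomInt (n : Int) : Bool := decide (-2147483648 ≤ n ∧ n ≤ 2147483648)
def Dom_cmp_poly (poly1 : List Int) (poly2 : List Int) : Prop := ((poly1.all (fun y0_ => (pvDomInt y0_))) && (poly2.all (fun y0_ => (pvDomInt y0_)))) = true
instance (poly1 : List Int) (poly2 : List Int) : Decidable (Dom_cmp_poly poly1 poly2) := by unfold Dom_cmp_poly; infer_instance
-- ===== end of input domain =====

-- B trims the trailing zeros of each polynomial and compares the trimmed lists,
-- replacing A's three index-driven while loops (objective: simpler).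

-- ===== PORT A =====
-- A's three while loops over the shared counter `tmp`, each as structural recursion
-- on the remaining distance.  Every index access `poly[tmp]` happens with tmp in
-- range (tmp < length is the loop guard), so it is ported as `getD tmp 0`.
def cmpLoop3 (poly2 : List Int) (tmp : Nat) : Bool :=
  if _h : tmp < poly2.length then
    if poly2.getD tmp 0 != 0 then false
    else cmpLoop3 poly2 (tmp + 1)
  else true
termination_by poly2.length - tmp

def cmpLoop2 (poly1 : List Int) (poly2 : List Int) (tmp : Nat) : Bool :=
  if _h : tmp < poly1.length then
    if poly1.getD tmp 0 != 0 then false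
    else cmpLoop2 poly1 poly2 (tmp + 1)
  else cmpLoop3 poly2 tmp
termination_by poly1.length - tmp

def cmpLoop1 (poly1 : List Int) (poly2 : List Int) (min_value : Nat) (tmp : Nat) : Bool :=
  if _h : tmp < min_value then
    if poly1.getD tmp 0 != poly2.getD tmp 0 then false
    else cmpLoop1 poly1 poly2 min_value (tmp + 1)
  else cmpLoop2 poly1 poly2 tmp
termination_by min_value - tmp

def cmp_poly (poly1 : List Int) (poly2 : List Int) : Bool :=
  cmpLoop1 poly1 poly2 (min poly1.length poly2.length) 0

-- ===== PORT B =====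
-- Source B's trim: while r and r[-1] == 0: r.pop().  `r[-1]` of a nonempty list is its
-- last element (getLast?.getD 0 under the nonemptiness guard), `pop()` is dropLast.
def trimLoop (r : List Int) : List Int :=
  if _h : r ≠ [] ∧ r.getLast?.getD 0 == 0 then trimLoop r.dropLast else r
termination_by r.length
decreasing_by
  rcases _h with ⟨hne, -⟩
  have : r.length ≠ 0 := fun h => hne (List.eq_nil_of_length_eq_zero h)
  simp [List.length_dropLast]; omega

def cmp_poly_alt (poly1 : List Int) (poly2 : List Int) : Bool :=
  trimLoop poly1 == trimLoop poly2

-- ===== PRECONDITION & SPEC =====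
def Spec_cmp_poly (poly1 : List Int) (poly2 : List Int) (out : Bool) : Prop := out = cmp_poly_alt poly1 poly2
instance (poly1 : List Int) (poly2 : List Int) (out : Bool) : Decidable (Spec_cmp_poly poly1 poly2 out) := by unfold Spec_cmp_poly; infer_instance

-- ===== CLAIM (what is proved, stated in full; the proofs are below) =====
def Claim_equal_cmp_poly : Prop := ∀ (poly1 : List Int) (poly2 : List Int), Dom_cmp_poly poly1 poly2 → Spec_cmp_poly poly1 poly2 (cmp_poly poly1 poly2)

-- ===== LEMMAS AND PROOFS =====

-- a structural middle ground between the two programs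
def eqPoly : List Int → List Int → Bool
  | [], q => q.all (· == 0)
  | p, [] => p.all (· == 0)
  | a :: p, b :: q => a == b && eqPoly p q

-- front-structural trimming of trailing zeros
def trimF : List Int → List Int
  | [] => []
  | a :: t =>
    match trimF t with
    | [] => if a == 0 then [] else [a]
    | b :: s => a :: b :: s

theorem cmpLoop3_eq (poly2 : List Int) (tmp : Nat) :
    cmpLoop3 poly2 tmp = (poly2.drop tmp).all (· == 0) := by
  fun_induction cmpLoop3 poly2 tmp with
  | case1 tmp h hne =>
    have hne' : ¬ poly2[tmp] = 0 := by
      simpa [List.getD_eq_getElem?_getD, List.getElem?_eq_getElem h] using hne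
    have hmem : poly2[tmp] ∈ poly2.drop tmp := by
      rw [List.drop_eq_getElem_cons h]; exact List.mem_cons_self
    symm
    simp only [List.all_eq_false]
    exact ⟨_, hmem, by simpa using hne'⟩
  | case2 tmp h hz ih =>
    rw [List.drop_eq_getElem_cons h]
    simp_all [List.getD_eq_getElem?_getD]
  | case3 tmp h =>
    rw [List.drop_eq_nil_of_le (by omega)]; rfl

theorem cmpLoop2_eq (poly1 poly2 : List Int) (tmp : Nat) :
    cmpLoop2 poly1 poly2 tmp =
      ((poly1.drop tmp).all (· == 0) && (poly2.drop (max tmp poly1.length)).all (· == 0)) := by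
  fun_induction cmpLoop2 poly1 poly2 tmp with
  | case1 tmp h hne =>
    have hne' : ¬ poly1[tmp] = 0 := by
      simpa [List.getD_eq_getElem?_getD, List.getElem?_eq_getElem h] using hne
    have hmem : poly1[tmp] ∈ poly1.drop tmp := by
      rw [List.drop_eq_getElem_cons h]; exact List.mem_cons_self
    have hz : (poly1.drop tmp).all (· == 0) = false := by
      simp only [List.all_eq_false]
      exact ⟨_, hmem, by simpa using hne'⟩
    simp [hz]
  | case2 tmp h hz ih =>
    rw [List.drop_eq_getElem_cons h]
    have hmax : max (tmp + 1) poly1.length = max tmp poly1.length := by omega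
    simp_all [List.getD_eq_getElem?_getD]
  | case3 tmp h =>
    rw [cmpLoop3_eq, Nat.max_eq_left (by omega : poly1.length ≤ tmp),
      List.drop_eq_nil_of_le (as := poly1) (by omega)]
    simp

theorem cmpLoop1_eq (poly1 poly2 : List Int) (mv tmp : Nat)
    (hmv : mv = min poly1.length poly2.length) (htmp : tmp ≤ mv) :
    cmpLoop1 poly1 poly2 mv tmp =
      (((poly1.drop tmp).zip (poly2.drop tmp)).all (fun ab => ab.1 == ab.2)
        && (poly1.drop mv).all (· == 0) && (poly2.drop mv).all (· == 0)) := by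
  fun_induction cmpLoop1 poly1 poly2 mv tmp with
  | case1 tmp h hne =>
    have h1 : tmp < poly1.length := by omega
    have h2 : tmp < poly2.length := by omega
    have hne' : ¬ poly1[tmp] = poly2[tmp] := by
      simpa [List.getD_eq_getElem?_getD, List.getElem?_eq_getElem, h1, h2] using hne
    have hmem : (poly1[tmp], poly2[tmp]) ∈ (poly1.drop tmp).zip (poly2.drop tmp) := by
      rw [List.drop_eq_getElem_cons h1, List.drop_eq_getElem_cons h2, List.zip_cons_cons]
      exact List.mem_cons_self
    have hz : ((poly1.drop tmp).zip (poly2.drop tmp)).all (fun ab => ab.1 == ab.2) = false := by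
      simp only [List.all_eq_false]
      exact ⟨_, hmem, by simpa using hne'⟩
    simp [hz]
  | case2 tmp h hz ih =>
    have h1 : tmp < poly1.length := by omega
    have h2 : tmp < poly2.length := by omega
    have hz' : poly1[tmp] = poly2[tmp] := by
      simpa [List.getD_eq_getElem?_getD, List.getElem?_eq_getElem, h1, h2] using hz
    rw [ih (by omega), List.drop_eq_getElem_cons h1, List.drop_eq_getElem_cons h2,
      List.zip_cons_cons, List.all_cons]
    simp [hz']
  | case3 tmp h =>
    have htm : tmp = mv := by omega
    subst htm
    rw [cmpLoop2_eq]
    rcases Nat.le_total poly1.length poly2.length with hle | hle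
    · have hmax : max tmp poly1.length = tmp := Nat.max_eq_left (by omega)
      have hn1 : poly1.drop tmp = [] := List.drop_eq_nil_of_le (by omega)
      rw [hmax, hn1]
      simp
    · have hq : poly2.drop tmp = [] := List.drop_eq_nil_of_le (by omega)
      have hq2 : poly2.drop (max tmp poly1.length) = [] := List.drop_eq_nil_of_le (by omega)
      rw [hq, hq2]
      simp

theorem cmp_poly_closed (poly1 poly2 : List Int) :
    cmp_poly poly1 poly2 =
      ((poly1.zip poly2).all (fun ab => ab.1 == ab.2)
        && (poly1.drop (min poly1.length poly2.length)).all (· == 0)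
        && (poly2.drop (min poly1.length poly2.length)).all (· == 0)) := by
  unfold cmp_poly
  rw [cmpLoop1_eq _ _ _ _ rfl (Nat.zero_le _)]
  simp

theorem eqPoly_closed (poly1 poly2 : List Int) :
    eqPoly poly1 poly2 =
      ((poly1.zip poly2).all (fun ab => ab.1 == ab.2)
        && (poly1.drop (min poly1.length poly2.length)).all (· == 0)
        && (poly2.drop (min poly1.length poly2.length)).all (· == 0)) := by
  induction poly1 generalizing poly2 with
  | nil => simp [eqPoly]
  | cons a p ih =>
    cases poly2 with
    | nil => simp [eqPoly]
    | cons b q =>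
      simp only [eqPoly, ih, List.zip_cons_cons, List.all_cons, List.length_cons,
        Nat.succ_min_succ, List.drop_succ_cons]
      simp [Bool.and_assoc]

theorem trimF_nil_iff (p : List Int) : trimF p = [] ↔ p.all (· == 0) = true := by
  induction p with
  | nil => simp [trimF]
  | cons a t ih =>
    simp only [trimF, List.all_cons, Bool.and_eq_true, beq_iff_eq]
    rcases h : trimF t with _ | ⟨b, s⟩
    · have ht : t.all (· == 0) = true := ih.mp h
      by_cases ha : a = 0 <;> simp [ha, ht]
    · have ht : ¬ t.all (· == 0) = true := fun hall => by simp [ih.mpr hall] at h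
      simp [ht]

theorem eqPoly_iff (p q : List Int) : eqPoly p q = true ↔ trimF p = trimF q := by
  induction p generalizing q with
  | nil =>
    simp only [eqPoly, trimF]
    rw [← trimF_nil_iff]
    exact ⟨fun h => h.symm, fun h => h.symm⟩
  | cons a p ih =>
    cases q with
    | nil =>
      show (a :: p).all (· == 0) = true ↔ _
      rw [← trimF_nil_iff]
      simp [trimF]
    | cons b q =>
      simp only [eqPoly, Bool.and_eq_true, beq_iff_eq, ih]
      constructor
      · rintro ⟨rfl, h⟩
        simp [trimF, h]
      · intro h
        simp only [trimF] at h
        rcases hp : trimF p with _ | ⟨c, s⟩ <;> rcases hq : trimF q with _ | ⟨d, u⟩ <;>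
          rw [hp, hq] at h
        · constructor
          · by_cases ha : a == 0 <;> by_cases hb : b == 0 <;> simp_all
          · rfl
        · exfalso; split_ifs at h with ha <;> simp_all
        · exfalso; split_ifs at h with hb <;> simp_all
        · simp_all

theorem trimLoop_reverse (l : List Int) :
    trimLoop l.reverse = (l.dropWhile (· == 0)).reverse := by
  induction l with
  | nil => rw [trimLoop]; simp
  | cons a t ih =>
    rw [List.reverse_cons, trimLoop]
    by_cases ha : (a : Int) = 0
    · subst ha
      have hc : (t.reverse ++ [(0 : Int)]) ≠ [] ∧
          ((t.reverse ++ [(0 : Int)]).getLast?.getD 0 == 0) = true := by simp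
      rw [dif_pos hc, List.dropLast_concat]
      rw [ih, List.dropWhile_cons_of_pos (by simp)]
    · have hc : ¬ ((t.reverse ++ [a]) ≠ [] ∧
          ((t.reverse ++ [a]).getLast?.getD 0 == 0) = true) := by
        simp [ha]
      rw [dif_neg hc, List.dropWhile_cons_of_neg (by simp [ha]), List.reverse_cons]

theorem trimF_reverse (p : List Int) :
    trimF p = (p.reverse.dropWhile (· == 0)).reverse := by
  induction p with
  | nil => simp [trimF]
  | cons a t ih =>
    rw [List.reverse_cons, List.dropWhile_append]
    rcases h : trimF t with _ | ⟨b, s⟩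
    · have hnil : t.reverse.dropWhile (· == 0) = [] := by
        have := ih; rw [h] at this
        have := congrArg List.reverse this
        simpa using this.symm
      rw [hnil]
      simp only [trimF, h, List.isEmpty_nil, if_true]
      by_cases ha : (a : Int) = 0
      · simp [ha, List.dropWhile_cons_of_pos]
      · rw [List.dropWhile_cons_of_neg (by simp [ha])]
        simp [ha]
    · have hne : t.reverse.dropWhile (· == 0) ≠ [] := by
        intro hnil
        have := ih; rw [h, hnil] at this; simp at this
      simp only [trimF, h, List.isEmpty_iff, if_neg hne, List.reverse_append,
        List.reverse_cons]
      rw [← ih, h]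
      simp

theorem trimLoop_eq_trimF (p : List Int) : trimLoop p = trimF p := by
  have := trimLoop_reverse p.reverse
  rw [List.reverse_reverse] at this
  rw [this, trimF_reverse]

theorem cmp_poly_eq_alt (poly1 poly2 : List Int) :
    cmp_poly poly1 poly2 = cmp_poly_alt poly1 poly2 := by
  rw [cmp_poly_closed, ← eqPoly_closed]
  unfold cmp_poly_alt
  rw [trimLoop_eq_trimF, trimLoop_eq_trimF]
  rw [Bool.eq_iff_iff, eqPoly_iff, beq_iff_eq]

-- ===== VERDICT (by name: the statement is the Claim_ definition above) =====
theorem cmp_poly_spec : Claim_equal_cmp_poly := by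
  intro poly1 poly2 _
  unfold Spec_cmp_poly
  exact cmp_poly_eq_alt poly1 poly2
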